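-- pv_equiv track=rewrite | github.com/Dazz993/Mist | mist/tuning/optimization.py | _get_device_mesh_candidates
-- ===== SOURCE A (Python) =====
-- POWER_OF_TWO = [2**i for i in range(0, 15)]
--
-- def _get_device_mesh_candidates(
--     num_nodes, num_gpus_per_node, contiguous_inter_node: bool = True
-- ):
--     device_mesh_candidates = []
--     for m in range(1, num_gpus_per_node + 1):
--         if m in POWER_OF_TWO:
--             device_mesh_candidates.append((1, m))
--     if contiguous_inter_node:
--         for n in range(2, num_nodes + 1):
--             device_mesh_candidates.append((n, num_gpus_per_node))
--     else:
--         for n in range(2, num_nodes + 1):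
--             if n in POWER_OF_TWO:
--                 device_mesh_candidates.append((n, num_gpus_per_node))
--     # Assert no duplicates
--     assert len(device_mesh_candidates) == len(set(device_mesh_candidates)), (
--         f"Duplicate device mesh candidates: {device_mesh_candidates}"
--     )
--     return device_mesh_candidates
-- ===== SOURCE B (Python) =====
-- POWER_OF_TWO = [2**i for i in range(0, 15)]
--
-- def _get_device_mesh_candidates(
--     num_nodes, num_gpus_per_node, contiguous_inter_node: bool = True
-- ):
--     # Generate powers of two directly instead of scanning 1..num_gpus_per_node
--     # with a membership test; duplicates are impossible by construction.
--     candidates = [(1, 2**i) for i in range(15) if 2**i <= num_gpus_per_node]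
--     if contiguous_inter_node:
--         candidates += [(n, num_gpus_per_node) for n in range(2, num_nodes + 1)]
--     else:
--         candidates += [
--             (2**i, num_gpus_per_node) for i in range(1, 15) if 2**i <= num_nodes
--         ]
--     return candidates
-- ===== Notes on version B (the rewrite author's own statement) =====
-- stated objective: faster
-- what changed: B generates the power-of-two candidates directly from the 15 exponents (and likewise for the non-contiguous node branch) instead of scanning every integer in 1..num_gpus_per_node and testing membership in POWER_OF_TWO, and drops the duplicate assertion, which is provably always true.
import Mathlib
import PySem

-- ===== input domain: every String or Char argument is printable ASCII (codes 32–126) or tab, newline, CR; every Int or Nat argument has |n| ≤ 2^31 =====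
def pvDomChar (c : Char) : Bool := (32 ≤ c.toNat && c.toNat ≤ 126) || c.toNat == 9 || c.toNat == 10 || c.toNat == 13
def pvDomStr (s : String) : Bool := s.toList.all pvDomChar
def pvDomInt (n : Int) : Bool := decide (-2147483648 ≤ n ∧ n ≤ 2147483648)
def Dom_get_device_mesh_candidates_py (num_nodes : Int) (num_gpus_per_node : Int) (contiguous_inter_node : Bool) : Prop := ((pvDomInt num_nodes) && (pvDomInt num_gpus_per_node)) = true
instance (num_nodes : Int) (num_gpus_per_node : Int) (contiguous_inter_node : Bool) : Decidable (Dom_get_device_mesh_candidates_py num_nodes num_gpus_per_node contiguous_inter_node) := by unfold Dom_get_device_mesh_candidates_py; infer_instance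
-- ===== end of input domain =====

-- B replaces A's scan of 1..num_gpus_per_node (membership-testing every integer) by direct
-- generation from the 15 exponents, and drops the always-true duplicate assertion (objective: faster).

-- ===== PORT A =====
def POWER_OF_TWO : List Int := (PySem.List.pyRange 0 15 1).map (fun i => 2 ^ i.toNat)

def get_device_mesh_candidates_py (num_nodes : Int) (num_gpus_per_node : Int) (contiguous_inter_node : Bool) : List (Int × Int) :=
  let c1 := (PySem.List.pyRange 1 (num_gpus_per_node + 1) 1).foldl
      (fun acc m => if m ∈ POWER_OF_TWO then acc ++ [((1 : Int), m)] else acc) []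
  let c2 :=
    if contiguous_inter_node then
      (PySem.List.pyRange 2 (num_nodes + 1) 1).foldl (fun acc n => acc ++ [(n, num_gpus_per_node)]) c1
    else
      (PySem.List.pyRange 2 (num_nodes + 1) 1).foldl
        (fun acc n => if n ∈ POWER_OF_TWO then acc ++ [(n, num_gpus_per_node)] else acc) c1
  -- the assert: duplicates would raise AssertionError; proved below to never fire
  if c2.length == (PySem.Set.ofList c2).length then c2 else []

-- ===== PORT B =====
def get_device_mesh_candidates_py_alt (num_nodes : Int) (num_gpus_per_node : Int) (contiguous_inter_node : Bool) : List (Int × Int) :=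
  let c1 := ((PySem.List.pyRange 0 15 1).filter
      (fun i => decide ((2 : Int) ^ i.toNat ≤ num_gpus_per_node))).map
      (fun i => ((1 : Int), (2 : Int) ^ i.toNat))
  if contiguous_inter_node then
    c1 ++ (PySem.List.pyRange 2 (num_nodes + 1) 1).map (fun n => (n, num_gpus_per_node))
  else
    c1 ++ ((PySem.List.pyRange 1 15 1).filter
      (fun i => decide ((2 : Int) ^ i.toNat ≤ num_nodes))).map
      (fun i => ((2 : Int) ^ i.toNat, num_gpus_per_node))

-- ===== PRECONDITION & SPEC =====
def Spec_get_device_mesh_candidates_py (num_nodes : Int) (num_gpus_per_node : Int) (contiguous_inter_node : Bool) (out : List (Int × Int)) : Prop := out = get_device_mesh_candidates_py_alt num_nodes num_gpus_per_node contiguous_inter_node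
instance (num_nodes : Int) (num_gpus_per_node : Int) (contiguous_inter_node : Bool) (out : List (Int × Int)) : Decidable (Spec_get_device_mesh_candidates_py num_nodes num_gpus_per_node contiguous_inter_node out) := by unfold Spec_get_device_mesh_candidates_py; infer_instance

-- ===== CLAIM (what is proved, stated in full; the proofs are below) =====
def Claim_equal_get_device_mesh_candidates_py : Prop := ∀ (num_nodes : Int) (num_gpus_per_node : Int) (contiguous_inter_node : Bool), Dom_get_device_mesh_candidates_py num_nodes num_gpus_per_node contiguous_inter_node → Spec_get_device_mesh_candidates_py num_nodes num_gpus_per_node contiguous_inter_node (get_device_mesh_candidates_py num_nodes num_gpus_per_node contiguous_inter_node)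

-- ===== LEMMAS AND PROOFS =====

-- Filtering an integer range by membership in a strictly increasing list P
-- picks out exactly the elements of P inside the range, in P's order.
theorem filter_mem_pyRange_sorted (P : List Int) (hP : P.Pairwise (· < ·)) (a b : Int) :
    (PySem.List.pyRange a b 1).filter (fun m => decide (m ∈ P)) =
      P.filter (fun p => decide (a ≤ p ∧ p < b)) := by
  induction P generalizing a with
  | nil => simp
  | cons p P' ih =>
    rw [List.pairwise_cons] at hP
    obtain ⟨hlt, hP'⟩ := hP
    by_cases hb : p < b
    · by_cases ha : a ≤ p
      · rw [PySem.List.pyRange_one_append a p b ha (by omega), List.filter_append,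
          PySem.List.pyRange_one_cons hb]
        have h1 : (PySem.List.pyRange a p 1).filter (fun m => decide (m ∈ p :: P')) = [] := by
          rw [List.filter_eq_nil_iff]
          intro x hx
          rw [PySem.List.mem_pyRange_one] at hx
          simp only [decide_eq_true_eq, List.mem_cons, not_or]
          exact ⟨by omega, fun hxp => by have := hlt x hxp; omega⟩
        have h2 : (PySem.List.pyRange (p + 1) b 1).filter (fun m => decide (m ∈ p :: P')) =
            (PySem.List.pyRange (p + 1) b 1).filter (fun m => decide (m ∈ P')) := by
          apply List.filter_congr
          intro x hx
          rw [PySem.List.mem_pyRange_one] at hx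
          simp only [decide_eq_decide, List.mem_cons]
          constructor
          · rintro (rfl | h)
            · exact absurd hx.1 (by omega)
            · exact h
          · exact Or.inr
        rw [h1, List.nil_append, List.filter_cons, List.filter_cons, h2, ih hP' (p + 1),
          if_pos (by simp), if_pos (by simp only [decide_eq_true_eq]; exact ⟨ha, hb⟩)]
        congr 1
        apply List.filter_congr
        intro q hq
        have := hlt q hq
        simp only [decide_eq_decide]
        omega
      · have h2 : (PySem.List.pyRange a b 1).filter (fun m => decide (m ∈ p :: P')) =
            (PySem.List.pyRange a b 1).filter (fun m => decide (m ∈ P')) := by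
          apply List.filter_congr
          intro x hx
          rw [PySem.List.mem_pyRange_one] at hx
          simp only [decide_eq_decide, List.mem_cons]
          constructor
          · rintro (rfl | h)
            · exact absurd hx.1 ha
            · exact h
          · exact Or.inr
        rw [h2, ih hP' a, List.filter_cons, if_neg (by simp only [decide_eq_true_eq]; omega)]
    · have h1 : (PySem.List.pyRange a b 1).filter (fun m => decide (m ∈ p :: P')) = [] := by
        rw [List.filter_eq_nil_iff]
        intro x hx
        rw [PySem.List.mem_pyRange_one] at hx
        simp only [decide_eq_true_eq, List.mem_cons, not_or]
        exact ⟨by omega, fun hxp => by have := hlt x hxp; omega⟩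
      rw [h1]
      symm
      rw [List.filter_eq_nil_iff]
      intro q hq
      simp only [decide_eq_true_eq, not_and]
      rcases List.mem_cons.mp hq with rfl | h
      · omega
      · have := hlt q h; omega

-- POWER_OF_TWO facts (concrete 15-element list)
theorem pow_pairwise : POWER_OF_TWO.Pairwise (· < ·) := by decide

theorem pow_ge_one : ∀ p ∈ POWER_OF_TWO, 1 ≤ p := by decide

theorem pow_eq_cons : POWER_OF_TWO = 1 :: (PySem.List.pyRange 1 15 1).map (fun i => (2 : Int) ^ i.toNat) := by decide

theorem pow_tail_ge_two : ∀ p ∈ (PySem.List.pyRange 1 15 1).map (fun i => (2 : Int) ^ i.toNat), 2 ≤ p := by decide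

-- the c1 part of A equals the c1 part of B
theorem c1_eq (g : Int) :
    (PySem.List.pyRange 1 (g + 1) 1).foldl
        (fun acc m => if m ∈ POWER_OF_TWO then acc ++ [((1 : Int), m)] else acc) [] =
      ((PySem.List.pyRange 0 15 1).filter (fun i => decide ((2 : Int) ^ i.toNat ≤ g))).map
        (fun i => ((1 : Int), (2 : Int) ^ i.toNat)) := by
  rw [PySem.List.foldl_append_ite, filter_mem_pyRange_sorted POWER_OF_TWO pow_pairwise,
    List.nil_append]
  have hB : ((PySem.List.pyRange 0 15 1).filter (fun i => decide ((2 : Int) ^ i.toNat ≤ g))).map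
      (fun i => ((1 : Int), (2 : Int) ^ i.toNat)) =
      (POWER_OF_TWO.filter (fun p => decide (p ≤ g))).map (fun p => ((1 : Int), p)) := by
    unfold POWER_OF_TWO
    rw [List.filter_map, List.map_map]
    rfl
  rw [hB]
  congr 1
  apply List.filter_congr
  intro p hp
  have := pow_ge_one p hp
  simp only [decide_eq_decide]
  omega

theorem noncontig_eq (nn g : Int) :
    ((PySem.List.pyRange 2 (nn + 1) 1).filter (fun n => decide (n ∈ POWER_OF_TWO))).map
        (fun n => (n, g)) =
      ((PySem.List.pyRange 1 15 1).filter (fun i => decide ((2 : Int) ^ i.toNat ≤ nn))).map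
        (fun i => ((2 : Int) ^ i.toNat, g)) := by
  rw [filter_mem_pyRange_sorted POWER_OF_TWO pow_pairwise]
  have hB : ((PySem.List.pyRange 1 15 1).filter (fun i => decide ((2 : Int) ^ i.toNat ≤ nn))).map
      (fun i => ((2 : Int) ^ i.toNat, g)) =
      (((PySem.List.pyRange 1 15 1).map (fun i => (2 : Int) ^ i.toNat)).filter
        (fun p => decide (p ≤ nn))).map (fun p => (p, g)) := by
    rw [List.filter_map, List.map_map]
    rfl
  rw [hB, pow_eq_cons, List.filter_cons]
  rw [if_neg (by simp only [decide_eq_true_eq]; omega)]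
  congr 1
  apply List.filter_congr
  intro p hp
  have := pow_tail_ge_two p hp
  simp only [decide_eq_decide]
  omega

theorem result_nodup (nn g : Int) (c : Bool) :
    (get_device_mesh_candidates_py_alt nn g c).Nodup := by
  unfold get_device_mesh_candidates_py_alt
  have h1 : (((PySem.List.pyRange 0 15 1).filter
      (fun i => decide ((2 : Int) ^ i.toNat ≤ g))).map
      (fun i => ((1 : Int), (2 : Int) ^ i.toNat))).Nodup := by
    apply List.Nodup.map_on
    · intro i hi j hj hij
      rw [List.mem_filter, PySem.List.mem_pyRange_one] at hi hj
      have h2 : (2 : Int) ^ i.toNat = 2 ^ j.toNat := congrArg Prod.snd hij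
      have : i.toNat = j.toNat :=
        Nat.pow_right_injective (a := 2) (by norm_num) (by exact_mod_cast h2)
      omega
    · exact (PySem.List.nodup_pyRange_one 0 15).filter _
  have hfst1 : ∀ x ∈ ((PySem.List.pyRange 0 15 1).filter
      (fun i => decide ((2 : Int) ^ i.toNat ≤ g))).map
      (fun i => ((1 : Int), (2 : Int) ^ i.toNat)), x.1 = 1 := by
    intro x hx
    rw [List.mem_map] at hx
    obtain ⟨i, _, rfl⟩ := hx
    rfl
  cases c with
  | true =>
    simp only [if_pos]
    rw [List.nodup_append]
    refine ⟨h1, ?_, ?_⟩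
    · apply List.Nodup.map
      · intro x y hxy
        exact congrArg Prod.fst hxy
      · exact PySem.List.nodup_pyRange_one 2 (nn + 1)
    · intro x hx y hy
      rw [List.mem_map] at hy
      obtain ⟨n, hn, rfl⟩ := hy
      rw [PySem.List.mem_pyRange_one] at hn
      have hf := hfst1 _ hx
      intro heq
      rw [heq] at hf
      simp at hf
      omega
  | false =>
    simp only [Bool.false_eq_true, ite_false]
    rw [List.nodup_append]
    refine ⟨h1, ?_, ?_⟩
    · apply List.Nodup.map_on
      · intro i hi j hj hij
        rw [List.mem_filter, PySem.List.mem_pyRange_one] at hi hj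
        have h2 : (2 : Int) ^ i.toNat = 2 ^ j.toNat := congrArg Prod.fst hij
        have : i.toNat = j.toNat :=
          Nat.pow_right_injective (a := 2) (by norm_num) (by exact_mod_cast h2)
        omega
      · exact (PySem.List.nodup_pyRange_one 1 15).filter _
    · intro x hx y hy
      rw [List.mem_map] at hy
      obtain ⟨i, hi, rfl⟩ := hy
      rw [List.mem_filter, PySem.List.mem_pyRange_one] at hi
      have hf := hfst1 _ hx
      have h2 : (2 : Int) ≤ 2 ^ i.toNat := by
        calc (2 : Int) = 2 ^ 1 := by norm_num
        _ ≤ 2 ^ i.toNat := by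
          apply pow_le_pow_right₀ (by norm_num)
          omega
      intro heq
      rw [heq] at hf
      simp at hf
      omega

-- ===== VERDICT (by name: the statement is the Claim_ definition above) =====
theorem get_device_mesh_candidates_py_spec : Claim_equal_get_device_mesh_candidates_py := by
  intro nn g c _
  unfold Spec_get_device_mesh_candidates_py get_device_mesh_candidates_py
  have hmain : (if c = true then
      (PySem.List.pyRange 2 (nn + 1) 1).foldl (fun acc n => acc ++ [(n, g)])
        ((PySem.List.pyRange 1 (g + 1) 1).foldl
          (fun acc m => if m ∈ POWER_OF_TWO then acc ++ [((1 : Int), m)] else acc) [])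
    else
      (PySem.List.pyRange 2 (nn + 1) 1).foldl
        (fun acc n => if n ∈ POWER_OF_TWO then acc ++ [(n, g)] else acc)
        ((PySem.List.pyRange 1 (g + 1) 1).foldl
          (fun acc m => if m ∈ POWER_OF_TWO then acc ++ [((1 : Int), m)] else acc) [])) =
      get_device_mesh_candidates_py_alt nn g c := by
    unfold get_device_mesh_candidates_py_alt
    cases c with
    | true =>
      simp only [if_pos]
      rw [PySem.List.foldl_append_singleton_eq_map, c1_eq]
    | false =>
      simp only [Bool.false_eq_true, ite_false]
      rw [PySem.List.foldl_append_ite, c1_eq, noncontig_eq]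
  simp only at hmain ⊢
  rw [hmain]
  have hnd := PySem.Set.ofList_eq_self_of_nodup _ (result_nodup nn g c)
  rw [hnd]
  simp
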